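-- pv_equiv track=rewrite | github.com/anatoly-scherbakov/dotfiles | bin/todo_toggl.py | resolve_todoist_project_name
-- ===== SOURCE A (Python) =====
-- from typing import Dict, List, Optional
--
-- def resolve_todoist_project_name(project_id: str, projects: Dict[str, dict]) -> str:
--     if not project_id or project_id not in projects:
--         return "#Inbox"
--     parts = []
--     current_id = project_id
--     while current_id and current_id in projects:
--         project = projects[current_id]
--         parts.append(project.get("name", current_id))
--         current_id = str(project.get("parent_id") or "")
--     return "#" + ":".join(reversed(parts))
-- ===== SOURCE B (Python) =====
-- def resolve_todoist_project_name(project_id: str, projects) -> str: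
--     if not project_id or project_id not in projects:
--         return "#Inbox"
--     project = projects[project_id]
--     name = project.get("name", project_id)
--     parent = str(project.get("parent_id") or "")
--     if parent and parent in projects:
--         return resolve_todoist_project_name(parent, projects) + ":" + name
--     return "#" + name
-- ===== Notes on version B (the rewrite author's own statement) =====
-- stated objective: simpler
-- what changed: B resolves the path as a direct top-down recursion on the parent chain (prefix-of-parent + ':' + name) instead of A's while loop that collects names into a list, reverses it and joins; Pre_ excludes cyclic parent chains, on which A's while loop never terminates.
import Mathlib
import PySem

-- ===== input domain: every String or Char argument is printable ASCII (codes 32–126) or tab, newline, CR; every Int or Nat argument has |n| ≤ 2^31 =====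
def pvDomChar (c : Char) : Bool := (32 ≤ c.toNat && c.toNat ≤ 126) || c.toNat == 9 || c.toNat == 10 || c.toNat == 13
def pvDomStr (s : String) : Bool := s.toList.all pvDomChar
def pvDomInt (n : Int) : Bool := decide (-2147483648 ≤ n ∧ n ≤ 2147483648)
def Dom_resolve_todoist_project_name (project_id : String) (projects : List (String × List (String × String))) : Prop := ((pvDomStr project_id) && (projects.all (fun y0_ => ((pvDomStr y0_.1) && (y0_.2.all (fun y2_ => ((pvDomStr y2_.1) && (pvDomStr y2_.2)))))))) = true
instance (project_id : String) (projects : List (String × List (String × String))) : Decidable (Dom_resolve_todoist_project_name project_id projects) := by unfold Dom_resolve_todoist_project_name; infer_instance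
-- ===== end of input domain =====

-- B rebuilds the path by direct top-down recursion on the parent chain instead of
-- A's collect-into-a-list / reverse / join loop (objective: simpler).

-- shared primitives of the two Pythons: first-match dict lookup,
-- project.get("name", current_id), and str(project.get("parent_id") or "")
def pvGet? (d : List (String × String)) (k : String) : Option String :=
  (d.find? (fun p => p.1 == k)).map (·.2)

def pvLookup (projects : List (String × List (String × String))) (k : String) :
    Option (List (String × String)) :=
  (projects.find? (fun p => p.1 == k)).map (·.2)

def pvNameOf (id : String) (proj : List (String × String)) : String :=
  (pvGet? proj "name").getD id

-- str(project.get("parent_id") or ""): None ↦ "", "" ↦ "", a string stays itself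
def pvParentOf (proj : List (String × String)) : String :=
  (pvGet? proj "parent_id").getD ""

-- ===== PORT A =====
-- A's while loop, fuelled for totality (the fuel projects.length+1 is never
-- exhausted on inputs satisfying Pre_, where the chain ends within that many steps)
def pvLoopA (projects : List (String × List (String × String))) :
    Nat → String → List String → List String
  | 0, _, parts => parts
  | fuel + 1, cur, parts =>
    if cur ≠ "" then
      match pvLookup projects cur with
      | some proj => pvLoopA projects fuel (pvParentOf proj) (parts ++ [pvNameOf cur proj])
      | none => parts
    else parts

def resolve_todoist_project_name (project_id : String)
    (projects : List (String × List (String × String))) : String :=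
  if project_id = "" ∨ (pvLookup projects project_id).isNone then "#Inbox"
  else "#" ++ PySem.Str.join ":" (pvLoopA projects (projects.length + 1) project_id []).reverse

-- ===== PORT B =====
-- B's recursion, fuelled for totality (never exhausted under Pre_)
def pvGoB (projects : List (String × List (String × String))) :
    Nat → String → String
  | 0, _ => "#Inbox"
  | fuel + 1, id =>
    if id = "" then "#Inbox"
    else
      match pvLookup projects id with
      | none => "#Inbox"
      | some proj =>
        let name := pvNameOf id proj
        let parent := pvParentOf proj
        if parent ≠ "" ∧ (pvLookup projects parent).isSome then
          pvGoB projects fuel parent ++ ":" ++ name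
        else "#" ++ name

def resolve_todoist_project_name_alt (project_id : String)
    (projects : List (String × List (String × String))) : String :=
  pvGoB projects (projects.length + 1) project_id

-- ===== PRECONDITION & SPEC =====
-- the parent map of the input data: "" and ids without an entry have no parent
def pvParentStep (projects : List (String × List (String × String)))
    (id : String) : String :=
  if id = "" then ""
  else
    match pvLookup projects id with
    | some proj => pvParentOf proj
    | none => ""

-- Pre_ excludes exactly the inputs whose parent chain from project_id is cyclic
-- (iterating the input's parent map |projects|+1 times does not leave the dict):
-- there A's while loop never terminates, so A returns no value.
def Pre_resolve_todoist_project_name (project_id : String)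
    (projects : List (String × List (String × String))) : Prop :=
  (pvParentStep projects)^[projects.length + 1] project_id = "" ∨
    (pvLookup projects ((pvParentStep projects)^[projects.length + 1] project_id)).isNone = true

instance (project_id : String) (projects : List (String × List (String × String))) :
    Decidable (Pre_resolve_todoist_project_name project_id projects) := by
  unfold Pre_resolve_todoist_project_name; infer_instance

def pvWitness_resolve_todoist_project_name :
    String × (List (String × List (String × String))) :=
  ("a", [("a", [("name", "Work"), ("parent_id", "b")]), ("b", [("name", "Top")])])

def Spec_resolve_todoist_project_name (project_id : String)
    (projects : List (String × List (String × String))) (out : String) : Prop :=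
  out = resolve_todoist_project_name_alt project_id projects

instance (project_id : String) (projects : List (String × List (String × String))) (out : String) :
    Decidable (Spec_resolve_todoist_project_name project_id projects out) := by
  unfold Spec_resolve_todoist_project_name; infer_instance

-- ===== CLAIM (what is proved, stated in full; the proofs are below) =====
def Claim_equal_resolve_todoist_project_name : Prop :=
  ∀ (project_id : String) (projects : List (String × List (String × String))),
    Dom_resolve_todoist_project_name project_id projects →
    Pre_resolve_todoist_project_name project_id projects →
    Spec_resolve_todoist_project_name project_id projects
      (resolve_todoist_project_name project_id projects)

-- ===== LEMMAS AND PROOFS =====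

-- proof-side helper: step-indexed form of "the chain from id leaves the dict"
def pvChainEnds (projects : List (String × List (String × String))) :
    Nat → String → Bool
  | 0, id => id == "" || (pvLookup projects id).isNone
  | n + 1, id =>
    if id == "" || (pvLookup projects id).isNone then true
    else pvChainEnds projects n (pvParentOf ((pvLookup projects id).getD []))

-- Pre_'s iterate form implies the step-indexed form the main induction consumes
theorem pv_pre_chainEnds (projects : List (String × List (String × String))) :
    ∀ (n : Nat) (id : String),
      ((pvParentStep projects)^[n] id = "" ∨
        (pvLookup projects ((pvParentStep projects)^[n] id)).isNone = true) →
      pvChainEnds projects n id = true := by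
  intro n
  induction n with
  | zero =>
    intro id h
    simp only [Function.iterate_zero_apply] at h
    rcases h with h | h <;> simp [pvChainEnds, h]
  | succ n ih =>
    intro id h
    by_cases hbad : id == "" || (pvLookup projects id).isNone
    · simp [pvChainEnds, hbad]
    · simp only [Bool.or_eq_true, beq_iff_eq, Option.isNone_iff_eq_none] at hbad
      push Not at hbad
      obtain ⟨hid, hsome⟩ := hbad
      cases hlk : pvLookup projects id with
      | none => exact absurd hlk hsome
      | some proj =>
        have hstep : pvParentStep projects id = pvParentOf proj := by
          simp [pvParentStep, hid, hlk]
        rw [Function.iterate_succ_apply, hstep] at h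
        simp only [pvChainEnds, hlk]
        have := ih (pvParentOf proj) h
        simp [hid, this]

-- accumulator lemma for A's loop
theorem pvLoopA_acc (projects : List (String × List (String × String))) :
    ∀ (fuel : Nat) (cur : String) (parts : List String),
      pvLoopA projects fuel cur parts = parts ++ pvLoopA projects fuel cur [] := by
  intro fuel
  induction fuel with
  | zero => intro cur parts; simp [pvLoopA]
  | succ f ih =>
    intro cur parts
    by_cases h : cur = ""
    · simp [pvLoopA, h]
    · cases hlk : pvLookup projects cur with
      | none => simp [pvLoopA, h, hlk]
      | some proj =>
        simp only [pvLoopA, if_pos h, hlk]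
        rw [ih (pvParentOf proj) (parts ++ [pvNameOf cur proj]),
            ih (pvParentOf proj) ([] ++ [pvNameOf cur proj])]
        simp

-- a bad current id stops the loop at once
theorem pvLoopA_stop (projects : List (String × List (String × String)))
    (fuel : Nat) (cur : String) (parts : List String)
    (h : cur = "" ∨ (pvLookup projects cur).isNone) :
    pvLoopA projects fuel cur parts = parts := by
  cases fuel with
  | zero => simp [pvLoopA]
  | succ f =>
    rcases h with h | h
    · simp [pvLoopA, h]
    · cases hlk : pvLookup projects cur with
      | none => by_cases hc : cur = "" <;> simp [pvLoopA, hc, hlk]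
      | some proj => rw [hlk] at h; simp at h

-- the loop collects at least one name when it can take a step
theorem pvLoopA_ne_nil (projects : List (String × List (String × String)))
    (fuel : Nat) (cur : String) (proj : List (String × String))
    (hfuel : 1 ≤ fuel) (hcur : cur ≠ "") (hlk : pvLookup projects cur = some proj) :
    pvLoopA projects fuel cur [] ≠ [] := by
  cases fuel with
  | zero => omega
  | succ f =>
    have h1 : pvLoopA projects (f + 1) cur []
        = pvLoopA projects f (pvParentOf proj) ([] ++ [pvNameOf cur proj]) := by
      simp only [pvLoopA, if_pos hcur, hlk]
    rw [h1, pvLoopA_acc projects f (pvParentOf proj) ([] ++ [pvNameOf cur proj])]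
    simp

-- joining lemmas, proved on List Char and lifted through toList
theorem pv_chars_join_append (s y : List Char) :
    ∀ (a : List Char) (xs : List (List Char)),
      PySem.Chars.join s ((a :: xs) ++ [y]) = PySem.Chars.join s (a :: xs) ++ s ++ y := by
  intro a xs
  induction xs generalizing a with
  | nil =>
    rw [show (a :: ([] : List (List Char))) ++ [y] = a :: y :: [] from rfl,
        PySem.Chars.join_cons_cons s a y [], PySem.Chars.join_singleton,
        PySem.Chars.join_singleton]
  | cons b xs ih =>
    rw [show (a :: b :: xs) ++ [y] = a :: ((b :: xs) ++ [y]) from rfl]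
    rw [show a :: ((b :: xs) ++ [y]) = a :: (b :: (xs ++ [y])) from rfl,
        PySem.Chars.join_cons_cons s a b (xs ++ [y]),
        show b :: (xs ++ [y]) = (b :: xs) ++ [y] from rfl, ih b,
        PySem.Chars.join_cons_cons s a b xs]
    simp [List.append_assoc]

theorem pv_join_singleton (y : String) : PySem.Str.join ":" [y] = y := by
  apply String.toList_injective
  simp [PySem.Chars.join_singleton]

theorem pv_join_append (xs : List String) (y : String) (h : xs ≠ []) :
    PySem.Str.join ":" (xs ++ [y]) = PySem.Str.join ":" xs ++ ":" ++ y := by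
  cases xs with
  | nil => exact absurd rfl h
  | cons a xs =>
    apply String.toList_injective
    have hch := pv_chars_join_append (":".toList) y.toList a.toList (xs.map String.toList)
    simpa using hch

-- main correspondence, one chain step at a time
theorem pv_main (projects : List (String × List (String × String))) :
    ∀ (fuel : Nat) (id : String) (proj : List (String × String)),
      pvChainEnds projects fuel id = true → id ≠ "" →
      pvLookup projects id = some proj →
      pvGoB projects fuel id =
        "#" ++ PySem.Str.join ":" (pvLoopA projects fuel id []).reverse := by
  intro fuel
  induction fuel with
  | zero =>
    intro id proj hce hid hlk
    simp [pvChainEnds, hid, hlk] at hce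
  | succ f ih =>
    intro id proj hce hid hlk
    simp only [pvChainEnds, hlk] at hce
    simp at hce
    rcases hce with hid' | hce
    · exact absurd hid' hid
    -- hce : pvChainEnds projects f (pvParentOf proj) = true
    have hloop : pvLoopA projects (f + 1) id []
        = [pvNameOf id proj] ++ pvLoopA projects f (pvParentOf proj) [] := by
      simp only [pvLoopA, if_pos hid, hlk]
      rw [pvLoopA_acc projects f (pvParentOf proj) ([] ++ [pvNameOf id proj])]
      simp
    have hgob : pvGoB projects (f + 1) id
        = (if pvParentOf proj ≠ "" ∧ (pvLookup projects (pvParentOf proj)).isSome then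
            pvGoB projects f (pvParentOf proj) ++ ":" ++ pvNameOf id proj
          else "#" ++ pvNameOf id proj) := by
      simp only [pvGoB, if_neg hid, hlk]
    by_cases hp : pvParentOf proj ≠ "" ∧ (pvLookup projects (pvParentOf proj)).isSome
    · obtain ⟨hpne, hps⟩ := hp
      cases hlk' : pvLookup projects (pvParentOf proj) with
      | none => rw [hlk'] at hps; simp at hps
      | some proj' =>
        have hf1 : 1 ≤ f := by
          cases f with
          | zero => simp [pvChainEnds, hpne, hlk'] at hce
          | succ f' => omega
        have hrest : pvLoopA projects f (pvParentOf proj) [] ≠ [] :=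
          pvLoopA_ne_nil projects f (pvParentOf proj) proj' hf1 hpne hlk'
        rw [hgob, if_pos ⟨hpne, hps⟩, hloop, ih (pvParentOf proj) proj' hce hpne hlk']
        rw [show ([pvNameOf id proj] ++ pvLoopA projects f (pvParentOf proj) []).reverse
            = (pvLoopA projects f (pvParentOf proj) []).reverse ++ [pvNameOf id proj] by simp]
        rw [pv_join_append _ _ (by simpa using hrest)]
        simp [String.append_assoc]
    · rw [hgob, if_neg hp, hloop]
      have hbadp : pvParentOf proj = "" ∨ (pvLookup projects (pvParentOf proj)).isNone := by
        rcases not_and_or.mp hp with h | h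
        · left; simpa using h
        · right; simpa [Option.isNone_iff_eq_none, Option.not_isSome_iff_eq_none] using h
      rw [pvLoopA_stop projects f (pvParentOf proj) [] hbadp]
      simp [pv_join_singleton]

-- ===== VERDICT (by name: the statement is the Claim_ definition above) =====
theorem resolve_todoist_project_name_spec : Claim_equal_resolve_todoist_project_name := by
  intro project_id projects _ hpre
  unfold Spec_resolve_todoist_project_name resolve_todoist_project_name
    resolve_todoist_project_name_alt
  by_cases hbad : project_id = "" ∨ (pvLookup projects project_id).isNone
  · rw [if_pos hbad]
    rcases hbad with h | h
    · simp [pvGoB, h]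
    · cases hlk : pvLookup projects project_id with
      | none => by_cases hc : project_id = "" <;> simp [pvGoB, hc, hlk]
      | some proj => rw [hlk] at h; simp at h
  · rw [if_neg hbad]
    push Not at hbad
    obtain ⟨hid, hns⟩ := hbad
    cases hlk : pvLookup projects project_id with
    | none => rw [hlk] at hns; simp at hns
    | some proj =>
      exact (pv_main projects (projects.length + 1) project_id proj
        (pv_pre_chainEnds projects (projects.length + 1) project_id hpre) hid hlk).symm
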